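-- pv_equiv track=rewrite | github.com/matslindh/codingchallenges | knowit2017/13.py | split_loot
-- ===== SOURCE A (Python) =====
-- def generate_sequence(n):
--     seq = [False]
--
--     while len(seq) < n:
--         seq += [not x for x in seq]
--
--     return seq[:n]
--
-- def split_loot(loot):
--     loot = sorted(loot, reverse=True)
--     seq = generate_sequence(len(loot))
--     vals = [0, 0]
--
--     for i, val in enumerate(seq):
--         idx = int(val)
--         vals[idx] += loot[i]
--
--     return vals
-- ===== SOURCE B (Python) =====
-- def split_loot(loot):
--     loot = sorted(loot, reverse=True)
--     vals = [0, 0]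
--
--     for i, val in enumerate(loot):
--         vals[i.bit_count() & 1] += val
--
--     return vals
-- ===== Notes on version B (the rewrite author's own statement) =====
-- stated objective: simpler
-- what changed: Replaces the doubling construction of the full Thue-Morse sequence (generate_sequence) with a pointwise closed form: the bucket of index i is the parity of i's popcount (i.bit_count() & 1), computed inside the single accumulation loop.
import Mathlib
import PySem

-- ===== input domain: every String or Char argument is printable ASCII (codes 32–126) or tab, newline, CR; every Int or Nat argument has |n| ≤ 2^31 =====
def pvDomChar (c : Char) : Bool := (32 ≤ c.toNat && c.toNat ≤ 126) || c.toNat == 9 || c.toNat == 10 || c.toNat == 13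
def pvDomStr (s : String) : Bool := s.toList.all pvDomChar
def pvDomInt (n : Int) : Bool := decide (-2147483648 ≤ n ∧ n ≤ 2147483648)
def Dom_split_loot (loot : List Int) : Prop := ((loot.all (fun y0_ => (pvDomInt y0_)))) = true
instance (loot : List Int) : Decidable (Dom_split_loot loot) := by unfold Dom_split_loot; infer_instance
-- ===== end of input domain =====

-- B replaces A's doubling construction of the Thue-Morse sequence by the pointwise
-- popcount-parity closed form inside the single accumulation loop (objective: simpler).

-- ===== PORT A =====
-- while len(seq) < n: seq += [not x for x in seq]   (seq starts nonempty, so it grows each pass)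
def genLoop (n : Nat) (seq : List Bool) (hpos : 0 < seq.length) : List Bool :=
  if _h : seq.length < n then
    genLoop n (seq ++ seq.map (fun x => !x)) (by simp; omega)
  else seq
termination_by n - seq.length
decreasing_by simp; omega

def generate_sequence (n : Nat) : List Bool :=
  (genLoop n [false] (by simp)).take n

def split_loot (loot : List Int) : List Int :=
  let loot2 := PySem.List.sorted loot (fun x => x) true
  let seq := generate_sequence loot2.length
  -- for i, val in enumerate(seq): vals[int(val)] += loot[i]
  -- idx ∈ {0,1} and i < len(loot) always hold, so getD/set/pyGetD are exact here
  (PySem.List.enumerate seq).foldl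
    (fun vals p =>
      let idx : Nat := if p.2 then 1 else 0
      vals.set idx (vals.getD idx 0 + PySem.List.pyGetD loot2 p.1 0)) [0, 0]

-- ===== PORT B =====
def split_loot_alt (loot : List Int) : List Int :=
  let loot2 := PySem.List.sorted loot (fun x => x) true
  -- for i, val in enumerate(loot): vals[i.bit_count() & 1] += val
  (PySem.List.enumerate loot2).foldl
    (fun vals p =>
      let idx : Nat := PySem.Int.bitCount p.1 &&& 1
      vals.set idx (vals.getD idx 0 + p.2)) [0, 0]

-- ===== PRECONDITION & SPEC =====
def Spec_split_loot (loot : List Int) (out : List Int) : Prop := out = split_loot_alt loot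
instance (loot : List Int) (out : List Int) : Decidable (Spec_split_loot loot out) := by unfold Spec_split_loot; infer_instance

-- ===== CLAIM (what is proved, stated in full; the proofs are below) =====
def Claim_equal_split_loot : Prop := ∀ (loot : List Int), Dom_split_loot loot → Spec_split_loot loot (split_loot loot)

-- ===== LEMMAS AND PROOFS =====

-- the Thue-Morse bit at index i: parity of the popcount of i
def tm (i : Nat) : Bool := PySem.Int.bitCount (i : Int) &&& 1 == 1

lemma pop_add_pow (k : Nat) : ∀ i, i < 2 ^ k →
    PySem.Int.bitCount ((2 ^ k + i : Nat) : Int) = PySem.Int.bitCount ((i : Nat) : Int) + 1 := by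
  induction k with
  | zero =>
      intro i hi
      interval_cases i
      decide
  | succ k ih =>
      intro i hi
      have hp : 2 ^ (k + 1) = 2 * 2 ^ k := by ring
      have hpos : 0 < 2 ^ (k + 1) + i := by positivity
      rw [PySem.Int.bitCount_natCast hpos]
      have hdiv : (2 ^ (k + 1) + i) / 2 = 2 ^ k + i / 2 := by omega
      have hmod : (2 ^ (k + 1) + i) % 2 = i % 2 := by omega
      rw [hdiv, hmod, ih (i / 2) (by omega)]
      rcases Nat.eq_zero_or_pos i with h0 | h0
      · subst h0; simp
      · rw [PySem.Int.bitCount_natCast h0]; omega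

lemma tm_add_pow (k i : Nat) (h : i < 2 ^ k) : tm (2 ^ k + i) = !tm i := by
  unfold tm
  rw [pop_add_pow k i h]
  rcases Nat.mod_two_eq_zero_or_one (PySem.Int.bitCount (i : Int)) with h2 | h2 <;>
    simp [Nat.and_one_is_mod, Nat.add_mod, h2]

lemma genLoop_spec (fuel : Nat) : ∀ (n : Nat) (seq : List Bool) (hpos : 0 < seq.length) (k : Nat),
    n ≤ seq.length + fuel → seq = (List.range (2 ^ k)).map tm →
    ∃ k', genLoop n seq hpos = (List.range (2 ^ k')).map tm ∧ n ≤ 2 ^ k' := by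
  induction fuel with
  | zero =>
      intro n seq hpos k hf hk
      have hlen : seq.length = 2 ^ k := by rw [hk]; simp
      rw [genLoop, dif_neg (by omega)]
      exact ⟨k, hk, by omega⟩
  | succ f ih =>
      intro n seq hpos k hf hk
      by_cases h : seq.length < n
      · rw [genLoop, dif_pos h]
        refine ih n _ (by simp; omega) (k + 1) (by simp; omega) ?_
        have h2 : 2 ^ (k + 1) = 2 ^ k + 2 ^ k := by ring
        rw [h2, List.range_add, List.map_append, hk, List.map_map]
        congr 1
        rw [List.map_map]
        refine List.map_congr_left (fun i hi => ?_)
        rw [List.mem_range] at hi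
        simp [Function.comp, tm_add_pow k i hi]
      · have hlen : seq.length = 2 ^ k := by rw [hk]; simp
        rw [genLoop, dif_neg h]
        exact ⟨k, hk, by omega⟩

lemma generate_sequence_eq (n : Nat) :
    generate_sequence n = (List.range n).map tm := by
  obtain ⟨k', hEq, hle⟩ := genLoop_spec n n [false] (by simp) 0 (by simp) (by decide)
  rw [generate_sequence, hEq, ← List.map_take, List.take_range, Nat.min_eq_left hle]

lemma body_eq (L : List Int) (j : Int) (hj : j ∈ PySem.List.pyRange 0 (((List.range L.length).map tm).length) 1)
    (vals : List Int) :
    (vals.set (if PySem.List.pyGetD ((List.range L.length).map tm) j false then 1 else 0)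
      (vals.getD (if PySem.List.pyGetD ((List.range L.length).map tm) j false then 1 else 0) 0
        + PySem.List.pyGetD L j 0))
    = (vals.set (PySem.Int.bitCount j &&& 1)
        (vals.getD (PySem.Int.bitCount j &&& 1) 0 + PySem.List.pyGetD L j 0)) := by
  rw [PySem.List.mem_pyRange_one] at hj
  simp only [List.length_map, List.length_range] at hj
  obtain ⟨h0, hn⟩ := hj
  obtain ⟨m, rfl⟩ : ∃ m : Nat, j = (m : Int) := ⟨j.toNat, (Int.toNat_of_nonneg h0).symm⟩
  have hm : m < L.length := by exact_mod_cast hn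
  rw [PySem.List.pyGetD_natCast]
  rw [List.getD_eq_getElem _ _ (by simpa using hm)]
  simp only [List.getElem_map, List.getElem_range]
  unfold tm
  rcases Nat.mod_two_eq_zero_or_one (PySem.Int.bitCount (m : Int)) with h2 | h2 <;>
    simp [Nat.and_one_is_mod, h2]

-- ===== VERDICT (by name: the statement is the Claim_ definition above) =====
theorem split_loot_spec : Claim_equal_split_loot := by
  intro loot _
  unfold Spec_split_loot split_loot split_loot_alt
  dsimp only
  set L := PySem.List.sorted loot (fun x => x) true with hL
  rw [generate_sequence_eq]
  rw [PySem.List.enumerate_eq_map_pyRange ((List.range L.length).map tm) false,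
      PySem.List.enumerate_eq_map_pyRange L 0]
  rw [List.foldl_map, List.foldl_map]
  simp only [PySem.List.len_eq, List.length_map, List.length_range]
  refine PySem.List.foldl_congr_mem _ _ _ _ (fun vals j hj => ?_)
  have hj' : j ∈ PySem.List.pyRange 0 (((List.range L.length).map tm).length) 1 := by
    simpa using hj
  simpa using body_eq L j hj' vals
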